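-- pv_equiv track=rewrite | github.com/ewgoedeke/fobe | eval/test_set.py | _build_cumulative
-- ===== SOURCE A (Python) =====
-- def _build_cumulative(core: list[str], pool: list[str], size: int) -> list[str]:
--     """Build a set of `size` documents: core first, then fill from pool."""
--     seen = set(core)
--     result = list(core)
--     for doc_id in pool:
--         if len(result) >= size:
--             break
--         if doc_id not in seen:
--             result.append(doc_id)
--             seen.add(doc_id)
--     return result
-- ===== SOURCE B (Python) =====
-- def _build_cumulative(core: list[str], pool: list[str], size: int) -> list[str]:
--     """Build a set of `size` documents: core first, then fill from pool."""
--     keep = max(size - len(core), 0)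
--     fresh = [d for i, d in enumerate(pool) if d not in core and pool.index(d) == i]
--     return core + fresh[:keep]
-- ===== Notes on version B (the rewrite author's own statement) =====
-- stated objective: alternative
-- what changed: Replaces A's stateful single pass (mutable seen-set plus result list with an interleaved size check and early break) by a stateless comprehension that keeps a pool element exactly when pool.index(d) == i marks it as a first occurrence and it is not in core (no auxiliary set or accumulator is maintained), followed by a clamped slice appended to core.
import Mathlib
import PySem

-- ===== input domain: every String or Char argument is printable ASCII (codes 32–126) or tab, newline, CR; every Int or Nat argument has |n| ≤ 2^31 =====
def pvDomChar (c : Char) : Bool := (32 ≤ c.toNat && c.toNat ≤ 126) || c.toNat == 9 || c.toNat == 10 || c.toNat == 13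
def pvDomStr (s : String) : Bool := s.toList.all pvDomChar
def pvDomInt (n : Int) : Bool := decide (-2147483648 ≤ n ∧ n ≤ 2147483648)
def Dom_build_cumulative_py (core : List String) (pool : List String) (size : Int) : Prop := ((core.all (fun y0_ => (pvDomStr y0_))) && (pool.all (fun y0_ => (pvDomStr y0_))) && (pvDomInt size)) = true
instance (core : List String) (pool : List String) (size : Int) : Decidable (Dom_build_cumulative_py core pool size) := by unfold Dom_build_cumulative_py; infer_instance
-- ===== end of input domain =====

-- B replaces A's seen-set accumulation loop with early break by a stateless first-occurrence (pool.index(d) == i) comprehension plus clamped slice; objective: alternative (B trades A's mutable state for repeated scans).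


-- ===== PORT A =====
-- A's for-loop over pool with early break; state = (seen, result)
def pvBuildLoop (size : Int) (pool : List String) (seen : PySem.Set String) (result : List String) : List String :=
  match pool with
  | [] => result
  | d :: rest =>
    if size ≤ (result.length : Int) then result
    else if PySem.Set.contains seen d then pvBuildLoop size rest seen result
    else pvBuildLoop size rest (PySem.Set.add seen d) (result ++ [d])

def build_cumulative_py (core : List String) (pool : List String) (size : Int) : List String :=
  pvBuildLoop size pool (PySem.Set.ofList core) core

-- ===== PORT B =====
def build_cumulative_py_alt (core : List String) (pool : List String) (size : Int) : List String :=
  let keep : Int := max (size - (core.length : Int)) 0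
  let fresh := ((PySem.List.enumerate pool 0).filter
      (fun p => !(core.contains p.2) && ((PySem.List.index? pool p.2).map (fun k => (k : Int)) == some p.1))).map (·.2)
  core ++ PySem.List.slice fresh none (some keep)

-- ===== PRECONDITION & SPEC =====
def Spec_build_cumulative_py (core : List String) (pool : List String) (size : Int) (out : List String) : Prop := out = build_cumulative_py_alt core pool size
instance (core : List String) (pool : List String) (size : Int) (out : List String) : Decidable (Spec_build_cumulative_py core pool size out) := by unfold Spec_build_cumulative_py; infer_instance

-- ===== CLAIM (what is proved, stated in full; the proofs are below) =====
def Claim_equal_build_cumulative_py : Prop := ∀ (core : List String) (pool : List String) (size : Int), Dom_build_cumulative_py core pool size → Spec_build_cumulative_py core pool size (build_cumulative_py core pool size)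

-- ===== LEMMAS AND PROOFS =====

-- the elements A's loop would append given the current seen set, in order, ignoring size
def pvNewElems (pool : List String) (seen : PySem.Set String) : List String :=
  match pool with
  | [] => []
  | d :: rest =>
    if PySem.Set.contains seen d then pvNewElems rest seen
    else d :: pvNewElems rest (PySem.Set.add seen d)

lemma pvBuildLoop_eq : ∀ (pool : List String) (seen : PySem.Set String) (result : List String) (size : Int),
    pvBuildLoop size pool seen result = result ++ (pvNewElems pool seen).take (size - result.length).toNat := by
  intro pool
  induction pool with
  | nil => intro seen result size; simp [pvBuildLoop, pvNewElems]
  | cons d rest ih =>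
    intro seen result size
    by_cases hsz : size ≤ (result.length : Int)
    · have : (size - result.length).toNat = 0 := by omega
      simp [pvBuildLoop, hsz, this]
    · by_cases h : PySem.Set.contains seen d
      · simp [pvBuildLoop, hsz, pvNewElems, ih, (PySem.Set.contains_iff seen d).mp h]
      · have hk : (size - result.length).toNat = (size - (result.length + 1)).toNat + 1 := by omega
        simp only [pvBuildLoop, hsz, if_false, h, Bool.false_eq_true]
        rw [ih]
        simp only [pvNewElems, h, Bool.false_eq_true, if_false]
        rw [hk, List.take_succ_cons]
        simp

-- A's appended elements = B's positional-look-back filter, generalized over the scanned prefix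
lemma pvNewElems_eq_filter (core : List String) :
    ∀ (rest pre : List String) (seen : PySem.Set String),
    (∀ d : String, d ∈ seen ↔ d ∈ core ∨ d ∈ pre) →
    pvNewElems rest seen =
      ((PySem.List.enumerate rest (pre.length : Int)).filter
        (fun p => !(core.contains p.2) && !(((pre ++ rest).take p.1.toNat).contains p.2))).map (·.2) := by
  intro rest
  induction rest with
  | nil => intro pre seen _; simp [pvNewElems, PySem.List.enumerate_nil]
  | cons d rest' ih =>
    intro pre seen hseen
    rw [PySem.List.enumerate_cons]
    have htake : ((pre.length : Int)).toNat = pre.length := by omega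
    have hpred : (!(core.contains d) && !(((pre ++ d :: rest').take ((pre.length : Int)).toNat).contains d))
        = !(PySem.Set.contains seen d) := by
      rw [htake, List.take_left]
      have : PySem.Set.contains seen d = (core.contains d || pre.contains d) := by
        by_cases hd : d ∈ seen
        · have := (hseen d).mp hd
          rcases this with h1 | h1 <;>
            simp [hd, h1]
        · have h2 : d ∉ core := fun hc => hd ((hseen d).mpr (Or.inl hc))
          have h3 : d ∉ pre := fun hc => hd ((hseen d).mpr (Or.inr hc))
          simp [hd, h2, h3]
      rw [this]; simp
    have happ : pre ++ d :: rest' = (pre ++ [d]) ++ rest' := by simp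
    have hlen : ((pre ++ [d]).length : Int) = (pre.length : Int) + 1 := by simp
    by_cases h : PySem.Set.contains seen d
    · have hinv : ∀ d' : String, d' ∈ seen ↔ d' ∈ core ∨ d' ∈ pre ++ [d] := by
        intro d'
        by_cases he : d' = d
        · simp [he, (PySem.Set.contains_iff seen d).mp h]
        · rw [hseen d']; simp [he]
      simp only [pvNewElems, h, if_true, List.filter_cons, hpred, Bool.not_true,
        Bool.false_eq_true, if_false]
      rw [ih (pre ++ [d]) seen hinv, hlen, happ]
    · have hdmem : d ∉ seen := fun hc => h ((PySem.Set.contains_iff seen d).mpr hc)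
      have hinv : ∀ d' : String, d' ∈ PySem.Set.add seen d ↔ d' ∈ core ∨ d' ∈ pre ++ [d] := by
        intro d'
        rw [PySem.Set.mem_add, hseen d']
        by_cases he : d' = d <;> simp [he]
      simp only [pvNewElems, h, Bool.false_eq_true, if_false, List.filter_cons, hpred,
        Bool.not_false, if_true, List.map_cons]
      rw [ih (pre ++ [d]) (PySem.Set.add seen d) hinv, hlen, happ]

-- ===== VERDICT (by name: the statement is the Claim_ definition above) =====
theorem build_cumulative_py_spec : Claim_equal_build_cumulative_py := by
  intro core pool size _
  unfold Spec_build_cumulative_py build_cumulative_py build_cumulative_py_alt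
  rw [pvBuildLoop_eq]
  have hofl : ∀ d : String, d ∈ PySem.Set.ofList core ↔ d ∈ core ∨ d ∈ ([] : List String) := by
    intro d; simp [PySem.Set.mem_ofList]
  have h1 := pvNewElems_eq_filter core pool [] (PySem.Set.ofList core) hofl
  simp only [List.nil_append, List.length_nil, Nat.cast_zero] at h1
  have hidx : ∀ (k : Nat) (hk : k < pool.length),
      (!((pool.take k).contains pool[k])) =
      ((PySem.List.index? pool pool[k]).map (fun j => (j : Int)) == some ((k : Nat) : Int)) := by
    intro k hk
    by_cases hmem : pool[k] ∈ pool.take k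
    · have hne : PySem.List.index? pool pool[k] ≠ some k := by
        intro heq
        rcases (PySem.List.index?_eq_some_iff pool pool[k] k).mp heq with ⟨pre, suf, hsplit, hlen, hnot⟩
        have : pool.take k = pre := by
          rw [hsplit]; exact List.take_left' hlen
        exact hnot (this ▸ hmem)
      have hc : (pool.take k).contains pool[k] = true := by
        simpa [List.contains_iff_mem] using hmem
      rw [hc]
      cases hidx? : PySem.List.index? pool pool[k] with
      | none => simp
      | some j =>
        have : j ≠ k := fun hjk => hne (by rw [hidx?, hjk])
        simp [Option.map_some, this]
    · have heq : PySem.List.index? pool pool[k] = some k := by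
        apply (PySem.List.index?_eq_some_iff pool pool[k] k).mpr
        refine ⟨pool.take k, pool.drop (k + 1), ?_, ?_, hmem⟩
        · conv_lhs => rw [← List.take_append_drop k pool]
          rw [List.drop_eq_getElem_cons hk]
        · exact List.length_take_of_le (le_of_lt hk)
      have hc : (pool.take k).contains pool[k] = false := by
        simpa [List.contains_iff_mem] using hmem
      rw [hc, heq]
      simp
  have hcong : (PySem.List.enumerate pool 0).filter
        (fun p => !(core.contains p.2) && !((pool.take p.1.toNat).contains p.2))
      = (PySem.List.enumerate pool 0).filter
        (fun p => !(core.contains p.2) && ((PySem.List.index? pool p.2).map (fun k => (k : Int)) == some p.1)) := by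
    apply List.filter_congr
    intro p hp
    rcases (PySem.List.mem_enumerate_iff pool 0 p).mp hp with ⟨k, hk, hpk⟩
    subst hpk
    simp only [zero_add, Int.toNat_natCast]
    rw [hidx k hk]
  rw [h1, hcong]
  have h3 : (0 : Int) ≤ max (size - (core.length : Int)) 0 := le_max_right _ _
  show core ++ (((PySem.List.enumerate pool 0).filter
      (fun p => !(core.contains p.2) && ((PySem.List.index? pool p.2).map (fun k => (k : Int)) == some p.1))).map (·.2)).take
        (size - (core.length : Int)).toNat
    = core ++ PySem.List.slice (((PySem.List.enumerate pool 0).filter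
      (fun p => !(core.contains p.2) && ((PySem.List.index? pool p.2).map (fun k => (k : Int)) == some p.1))).map (·.2)) none
        (some (max (size - (core.length : Int)) 0))
  rw [PySem.List.slice_to _ h3]
  have h4 : (size - (core.length : Int)).toNat = (max (size - (core.length : Int)) 0).toNat := by omega
  rw [h4]
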